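-- pv_equiv track=rewrite | github.com/myaiexp/investiq | backend/app/services/indicators.py | _signal_obv
-- ===== SOURCE A (Python) =====
-- def _signal_obv(data: dict) -> str:
--     points = data["obv"]
--     if len(points) < 5:
--         return "hold"
--     # Compare last 5 points for trend direction
--     recent = [p["value"] for p in points[-5:]]
--     rising = all(recent[i] <= recent[i + 1] for i in range(len(recent) - 1))
--     falling = all(recent[i] >= recent[i + 1] for i in range(len(recent) - 1))
--     if rising:
--         return "buy"
--     elif falling:
--         return "sell"
--     return "hold"
-- ===== SOURCE B (Python) =====
-- def _signal_obv(data: dict) -> str: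
--     points = data["obv"]
--     if len(points) < 5:
--         return "hold"
--     recent = [p["value"] for p in points[-5:]]
--     if recent == sorted(recent):
--         return "buy"
--     if recent == sorted(recent, reverse=True):
--         return "sell"
--     return "hold"
-- ===== Notes on version B (the rewrite author's own statement) =====
-- stated objective: idiomatic
-- what changed: Replaces the two index-based pairwise all() scans with comparisons of the recent window against its sorted and reverse-sorted copies.
import Mathlib
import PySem

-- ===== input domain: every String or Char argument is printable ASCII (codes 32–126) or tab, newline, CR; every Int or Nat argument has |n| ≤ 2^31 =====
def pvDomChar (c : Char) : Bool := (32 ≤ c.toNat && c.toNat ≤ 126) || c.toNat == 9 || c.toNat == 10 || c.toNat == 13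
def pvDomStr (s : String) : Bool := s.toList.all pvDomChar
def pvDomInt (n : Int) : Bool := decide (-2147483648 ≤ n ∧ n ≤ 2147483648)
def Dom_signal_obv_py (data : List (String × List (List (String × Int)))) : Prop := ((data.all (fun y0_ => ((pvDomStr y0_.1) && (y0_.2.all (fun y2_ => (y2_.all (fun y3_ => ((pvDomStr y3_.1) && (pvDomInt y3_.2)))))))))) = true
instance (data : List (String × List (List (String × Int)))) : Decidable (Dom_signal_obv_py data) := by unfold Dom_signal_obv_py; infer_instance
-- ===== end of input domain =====

-- B tests the 5-point window for monotonicity by comparing it with its sorted / reverse-sorted copy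
-- instead of A's two index-based pairwise all() scans (idiomatic; return-value equivalence only).

-- shared dict lookup d[k] (first match, as both Pythons perform the same subscript)
def pvLookup {β : Type} (d : List (String × β)) (k : String) : Option β :=
  (d.find? (fun kv => kv.1 == k)).map (·.2)

-- ===== PORT A =====
def signal_obv_py (data : List (String × List (List (String × Int)))) : String :=
  match pvLookup data "obv" with
  | none => "hold"  -- KeyError in Python; excluded by Pre_
  | some points =>
    if points.length < 5 then "hold"
    else
      let recent := (PySem.List.slice points (some (-5)) none).map
        (fun p => (pvLookup p "value").getD 0)  -- KeyError (none) excluded by Pre_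
      let rising := (PySem.List.pyRange 0 ((recent.length : Int) - 1) 1).all
        (fun i => decide (PySem.List.pyGetD recent i 0 ≤ PySem.List.pyGetD recent (i + 1) 0))
      let falling := (PySem.List.pyRange 0 ((recent.length : Int) - 1) 1).all
        (fun i => decide (PySem.List.pyGetD recent i 0 ≥ PySem.List.pyGetD recent (i + 1) 0))
      if rising then "buy"
      else if falling then "sell"
      else "hold"

-- ===== PORT B =====
def signal_obv_py_alt (data : List (String × List (List (String × Int)))) : String :=
  match pvLookup data "obv" with
  | none => "hold"  -- KeyError in Python; excluded by Pre_
  | some points =>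
    if points.length < 5 then "hold"
    else
      let recent := (PySem.List.slice points (some (-5)) none).map
        (fun p => (pvLookup p "value").getD 0)  -- KeyError (none) excluded by Pre_
      if recent = PySem.List.sorted recent (fun x => x) false then "buy"
      else if recent = PySem.List.sorted recent (fun x => x) true then "sell"
      else "hold"

-- ===== PRECONDITION & SPEC =====
-- Pre_ excludes exactly the inputs on which Python A raises KeyError: a missing "obv" key,
-- or (when at least 5 points are present) a point in the last-5 window without a "value" key.
def Pre_signal_obv_py (data : List (String × List (List (String × Int)))) : Prop :=
  (pvLookup data "obv").isSome = true ∧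
  (5 ≤ ((pvLookup data "obv").getD []).length →
    ∀ p ∈ PySem.List.slice ((pvLookup data "obv").getD []) (some (-5)) none,
      (pvLookup p "value").isSome = true)
instance (data : List (String × List (List (String × Int)))) : Decidable (Pre_signal_obv_py data) := by
  unfold Pre_signal_obv_py; infer_instance

def pvWitness_signal_obv_py : (List (String × List (List (String × Int)))) :=
  [("obv", [[("value", 1)], [("value", 2)], [("value", 3)], [("value", 2)], [("value", 5)]])]

def Spec_signal_obv_py (data : List (String × List (List (String × Int)))) (out : String) : Prop := out = signal_obv_py_alt data
instance (data : List (String × List (List (String × Int)))) (out : String) : Decidable (Spec_signal_obv_py data out) := by unfold Spec_signal_obv_py; infer_instance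

-- ===== CLAIM (what is proved, stated in full; the proofs are below) =====
def Claim_equal_signal_obv_py : Prop := ∀ (data : List (String × List (List (String × Int)))), Dom_signal_obv_py data → Pre_signal_obv_py data → Spec_signal_obv_py data (signal_obv_py data)

-- ===== LEMMAS AND PROOFS =====

-- A's rising scan over adjacent indices is exactly "pairwise ≤"
lemma all_adj_le_iff (xs : List Int) :
    ((PySem.List.pyRange 0 ((xs.length : Int) - 1) 1).all
      (fun i => decide (PySem.List.pyGetD xs i 0 ≤ PySem.List.pyGetD xs (i + 1) 0)) = true)
    ↔ xs.Pairwise (· ≤ ·) := by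
  rw [← List.isChain_iff_pairwise, List.isChain_iff_getElem, List.all_eq_true]
  constructor
  · intro h i hi
    have := h (i : Int) (by
      rw [PySem.List.mem_pyRange_one]; omega)
    simp only [decide_eq_true_eq] at this
    rwa [PySem.List.pyGetD_natCast, show ((i : Int) + 1) = ((i + 1 : Nat) : Int) by push_cast; ring,
      PySem.List.pyGetD_natCast, List.getD_eq_getElem _ _ (by omega),
      List.getD_eq_getElem _ _ (by omega)] at this
  · intro h i hi
    rw [PySem.List.mem_pyRange_one] at hi
    obtain ⟨n, rfl⟩ := Int.eq_ofNat_of_zero_le hi.1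
    have hn : n + 1 < xs.length := by omega
    simp only [decide_eq_true_eq]
    rw [PySem.List.pyGetD_natCast, show ((n : Int) + 1) = ((n + 1 : Nat) : Int) by push_cast; ring,
      PySem.List.pyGetD_natCast, List.getD_eq_getElem _ _ (by omega),
      List.getD_eq_getElem _ _ (by omega)]
    exact h n hn

-- A's falling scan is exactly "pairwise ≥"
lemma all_adj_ge_iff (xs : List Int) :
    ((PySem.List.pyRange 0 ((xs.length : Int) - 1) 1).all
      (fun i => decide (PySem.List.pyGetD xs i 0 ≥ PySem.List.pyGetD xs (i + 1) 0)) = true)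
    ↔ xs.Pairwise (fun a b => b ≤ a) := by
  rw [← List.isChain_iff_pairwise, List.isChain_iff_getElem, List.all_eq_true]
  constructor
  · intro h i hi
    have := h (i : Int) (by
      rw [PySem.List.mem_pyRange_one]; omega)
    simp only [decide_eq_true_eq, ge_iff_le] at this
    rwa [PySem.List.pyGetD_natCast, show ((i : Int) + 1) = ((i + 1 : Nat) : Int) by push_cast; ring,
      PySem.List.pyGetD_natCast, List.getD_eq_getElem _ _ (by omega),
      List.getD_eq_getElem _ _ (by omega)] at this
  · intro h i hi
    rw [PySem.List.mem_pyRange_one] at hi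
    obtain ⟨n, rfl⟩ := Int.eq_ofNat_of_zero_le hi.1
    have hn : n + 1 < xs.length := by omega
    simp only [decide_eq_true_eq, ge_iff_le]
    rw [PySem.List.pyGetD_natCast, show ((n : Int) + 1) = ((n + 1 : Nat) : Int) by push_cast; ring,
      PySem.List.pyGetD_natCast, List.getD_eq_getElem _ _ (by omega),
      List.getD_eq_getElem _ _ (by omega)]
    exact h n hn

-- "xs == sorted(xs)" is exactly "pairwise ≤"
lemma eq_sorted_iff (xs : List Int) :
    xs = PySem.List.sorted xs (fun x => x) false ↔ xs.Pairwise (· ≤ ·) := by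
  constructor
  · intro h
    have := PySem.List.sorted_pairwise (xs := xs) (key := fun x => x)
    rwa [← h] at this
  · intro h
    exact (PySem.List.sorted_eq_self_of_pairwise xs (fun x => x) h).symm

-- "xs == sorted(xs, reverse=True)" is exactly "pairwise ≥"
lemma eq_sorted_rev_iff (xs : List Int) :
    xs = PySem.List.sorted xs (fun x => x) true ↔ xs.Pairwise (fun a b => b ≤ a) := by
  constructor
  · intro h
    have := PySem.List.sorted_pairwise_rev (xs := xs) (key := fun x => x)
    rwa [← h] at this
  · intro h
    exact (PySem.List.sorted_rev_eq_self_of_pairwise xs (fun x => x) h).symm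

-- ===== VERDICT (by name: the statement is the Claim_ definition above) =====
theorem signal_obv_py_spec : Claim_equal_signal_obv_py := by
  intro data _ _
  unfold Spec_signal_obv_py signal_obv_py signal_obv_py_alt
  cases h : pvLookup data "obv" with
  | none => rfl
  | some points =>
    by_cases hlen : points.length < 5
    · simp [hlen]
    · simp only [hlen, if_false]
      set recent := (PySem.List.slice points (some (-5)) none).map
        (fun p => (pvLookup p "value").getD 0) with hrec
      by_cases hr : recent.Pairwise (· ≤ ·)
      · rw [if_pos ((all_adj_le_iff recent).mpr hr), if_pos ((eq_sorted_iff recent).mpr hr)]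
      · rw [if_neg (fun hc => hr ((all_adj_le_iff recent).mp hc)),
          if_neg (fun hc => hr ((eq_sorted_iff recent).mp hc))]
        by_cases hf : recent.Pairwise (fun a b => b ≤ a)
        · rw [if_pos ((all_adj_ge_iff recent).mpr hf), if_pos ((eq_sorted_rev_iff recent).mpr hf)]
        · rw [if_neg (fun hc => hf ((all_adj_ge_iff recent).mp hc)),
            if_neg (fun hc => hf ((eq_sorted_rev_iff recent).mp hc))]
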